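-- pv_equiv track=rewrite | github.com/QAssemble/qassemble | src/QAssemble/utility/MPIManager.py | KRCompositeIndex
-- ===== SOURCE A (Python) =====
-- def KRCompositeIndex(local_slice):
--
--     idx = {}
--
--     for rank, slices in local_slice.items():
--         (x0, x1), (y0, y1), (z0, z1) = slices
--
--         loc_idx = 0
--         loc_dict = {}
--
--         for z in range(z0, z1):
--             for y in range(y0, y1):
--                 for x in range(x0, x1):
--                     loc_dict[loc_idx] = [x, y, z]
--                     loc_idx += 1
--
--         idx[rank] = loc_dict
--
--     return idx
-- ===== SOURCE B (Python) =====
-- def KRCompositeIndex(local_slice):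
--     idx = {}
--     for rank, ((x0, x1), (y0, y1), (z0, z1)) in local_slice.items():
--         nx = max(0, x1 - x0)
--         ny = max(0, y1 - y0)
--         nz = max(0, z1 - z0)
--         idx[rank] = {i: [x0 + i % nx, y0 + (i // nx) % ny, z0 + i // (nx * ny)]
--                      for i in range(nx * ny * nz)}
--     return idx
-- ===== Notes on version B (the rewrite author's own statement) =====
-- stated objective: alternative
-- what changed: Replaces the three nested z/y/x loops and the running loc_idx counter with a single flat loop over range(nx*ny*nz) that recovers each coordinate by closed-form div/mod index arithmetic (x-fastest, z-slowest).
import Mathlib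
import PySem

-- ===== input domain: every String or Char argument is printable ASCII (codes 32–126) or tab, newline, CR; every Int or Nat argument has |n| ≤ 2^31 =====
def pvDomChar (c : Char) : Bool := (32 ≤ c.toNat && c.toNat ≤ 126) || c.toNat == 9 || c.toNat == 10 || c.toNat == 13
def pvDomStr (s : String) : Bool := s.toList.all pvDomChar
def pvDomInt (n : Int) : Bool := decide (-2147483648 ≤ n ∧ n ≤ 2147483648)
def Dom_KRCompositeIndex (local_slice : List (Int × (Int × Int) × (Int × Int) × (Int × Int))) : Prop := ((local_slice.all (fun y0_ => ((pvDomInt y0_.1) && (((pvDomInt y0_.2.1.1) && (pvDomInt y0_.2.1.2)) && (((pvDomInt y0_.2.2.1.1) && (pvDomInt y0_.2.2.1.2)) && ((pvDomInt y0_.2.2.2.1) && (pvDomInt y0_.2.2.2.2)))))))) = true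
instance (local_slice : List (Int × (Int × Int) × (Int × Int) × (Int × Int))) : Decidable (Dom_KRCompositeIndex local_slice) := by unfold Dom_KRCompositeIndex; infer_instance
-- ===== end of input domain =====

-- B replaces A's three nested z/y/x loops and running counter by one flat loop over
-- range(nx*ny*nz) recovering each coordinate with div/mod index arithmetic (alternative decomposition, same cost).

-- ===== PORT A =====
-- per-rank body of A: triple nested loop carrying (loc_idx, loc_dict); loc_dict's keys
-- (the counter values) are always fresh, so the insertion-ordered dict is accumulated as its
-- association list, consed in reverse and reversed once at the end (linear, same insertion order).
def pvLocA (x0 x1 y0 y1 z0 z1 : Int) : Int × List (Int × List Int) :=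
  (PySem.List.pyRange z0 z1 1).foldl
    (fun s z =>
      (PySem.List.pyRange y0 y1 1).foldl
        (fun s y =>
          (PySem.List.pyRange x0 x1 1).foldl
            (fun s x => (s.1 + 1, (s.1, [x, y, z]) :: s.2)) s) s)
    ((0 : Int), ([] : List (Int × List Int)))

def KRCompositeIndex (local_slice : List (Int × (Int × Int) × (Int × Int) × (Int × Int))) : List (Int × List (Int × List Int)) :=
  ((PySem.Dict.ofList local_slice).items.foldl
    (fun idx p =>
      idx.insert p.1 (pvLocA p.2.1.1 p.2.1.2 p.2.2.1.1 p.2.2.1.2 p.2.2.2.1 p.2.2.2.2).2.reverse)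
    (PySem.Dict.empty : PySem.Dict Int (List (Int × List Int)))).items

-- ===== PORT B =====
-- per-rank body of B: the dict comprehension over range(nx*ny*nz) with closed-form div/mod
-- coordinates; its keys (the range itself) are distinct, so it IS its association list, a map.
def pvLocB (x0 x1 y0 y1 z0 z1 : Int) : List (Int × List Int) :=
  let nx := max 0 (x1 - x0)
  let ny := max 0 (y1 - y0)
  let nz := max 0 (z1 - z0)
  (PySem.List.pyRange 0 (nx * ny * nz) 1).map
    (fun i =>
      (i, [x0 + PySem.Int.mod i nx,
           y0 + PySem.Int.mod (PySem.Int.floordiv i nx) ny,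
           z0 + PySem.Int.floordiv i (nx * ny)]))

def KRCompositeIndex_alt (local_slice : List (Int × (Int × Int) × (Int × Int) × (Int × Int))) : List (Int × List (Int × List Int)) :=
  ((PySem.Dict.ofList local_slice).items.foldl
    (fun idx p =>
      idx.insert p.1 (pvLocB p.2.1.1 p.2.1.2 p.2.2.1.1 p.2.2.1.2 p.2.2.2.1 p.2.2.2.2))
    (PySem.Dict.empty : PySem.Dict Int (List (Int × List Int)))).items

-- ===== PRECONDITION & SPEC =====
def Spec_KRCompositeIndex (local_slice : List (Int × (Int × Int) × (Int × Int) × (Int × Int))) (out : List (Int × List (Int × List Int))) : Prop := out = KRCompositeIndex_alt local_slice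
instance (local_slice : List (Int × (Int × Int) × (Int × Int) × (Int × Int))) (out : List (Int × List (Int × List Int))) : Decidable (Spec_KRCompositeIndex local_slice out) := by unfold Spec_KRCompositeIndex; infer_instance

-- ===== CLAIM (what is proved, stated in full; the proofs are below) =====
def Claim_equal_KRCompositeIndex : Prop := ∀ (local_slice : List (Int × (Int × Int) × (Int × Int) × (Int × Int))), Dom_KRCompositeIndex local_slice → Spec_KRCompositeIndex local_slice (KRCompositeIndex local_slice)

-- ===== LEMMAS AND PROOFS =====

-- length of a flatMap over `range n` whose blocks all have length m
theorem pvFlatLen {α : Type} (g : Nat → List α) (m n : Nat)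
    (h : ∀ j < n, (g j).length = m) :
    ((List.range n).flatMap g).length = n * m := by
  induction n with
  | zero => simp
  | succ n ih =>
    rw [List.range_succ, List.flatMap_append]
    simp only [List.length_append, ih (fun j hj => h j (by omega)),
      List.flatMap_cons, List.flatMap_nil, List.append_nil, h n (by omega)]
    ring

-- indexing a flatMap over `range n` with constant block length m
theorem pvFlatGet {α : Type} (g : Nat → List α) (m n k : Nat)
    (h : ∀ j < n, (g j).length = m) (hk : k < n * m) :
    ((List.range n).flatMap g)[k]? = (g (k / m))[k % m]? := by
  induction n with
  | zero => omega
  | succ n ih =>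
    rw [List.range_succ, List.flatMap_append]
    have hlen : ((List.range n).flatMap g).length = n * m :=
      pvFlatLen g m n (fun j hj => h j (by omega))
    by_cases hc : k < n * m
    · rw [List.getElem?_append_left (by omega)]
      exact ih (fun j hj => h j (by omega)) hc
    · have hs : (n + 1) * m = n * m + m := by ring
      have hm : 0 < m := by by_contra hm0; omega
      have hq : k / m = n := Nat.div_eq_of_lt_le (by omega) (by omega)
      have hr : k % m = k - n * m := by
        have hdm := Nat.div_add_mod k m
        rw [hq, Nat.mul_comm] at hdm
        omega
      rw [List.getElem?_append_right (by omega)]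
      simp only [List.flatMap_cons, List.flatMap_nil, List.append_nil, hlen, hq, hr]

-- A's triple loop flattened into a single fold over the explicit coordinate list
def pvCoords (x0 y0 z0 : Int) (nx ny nz : Nat) : List (List Int) :=
  (List.range nz).flatMap (fun (j : Nat) =>
    (List.range ny).flatMap (fun (t : Nat) =>
      (List.range nx).map (fun (k : Nat) => [x0 + (k : Int), y0 + (t : Int), z0 + (j : Int)])))

theorem pvCoords_length (x0 y0 z0 : Int) (nx ny nz : Nat) :
    (pvCoords x0 y0 z0 nx ny nz).length = nz * (ny * nx) := by
  unfold pvCoords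
  apply pvFlatLen
  intro j _
  apply pvFlatLen
  intro t _
  simp

theorem pvCoords_get (x0 y0 z0 : Int) (nx ny nz k : Nat) (hk : k < nz * (ny * nx)) :
    (pvCoords x0 y0 z0 nx ny nz)[k]? =
      some [x0 + ((k % nx : Nat) : Int), y0 + ((k / nx % ny : Nat) : Int), z0 + ((k / (nx * ny) : Nat) : Int)] := by
  unfold pvCoords
  rw [pvFlatGet _ (ny * nx) nz k (fun j _ => by
        apply pvFlatLen; intro t _; simp) hk]
  have h0 : 0 < nz * (ny * nx) := by omega
  have hnx : 0 < nx := by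
    rcases Nat.eq_zero_or_pos nx with h | h
    · subst h; simp at h0
    · exact h
  have hny : 0 < ny := by
    rcases Nat.eq_zero_or_pos ny with h | h
    · subst h; simp at h0
    · exact h
  have hk2 : k % (ny * nx) < ny * nx := Nat.mod_lt _ (by positivity)
  rw [pvFlatGet _ nx ny (k % (ny * nx)) (fun t _ => by simp) hk2]
  have h1 : k % (ny * nx) % nx = k % nx := Nat.mod_mod_of_dvd _ ⟨ny, by ring⟩
  have h2 : k % (ny * nx) / nx = k / nx % ny := by
    rw [mul_comm ny nx]; exact Nat.mod_mul_right_div_self k nx ny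
  have h3 : k / (nx * ny) = k / (ny * nx) := by rw [mul_comm]
  have hlt : k % (ny * nx) % nx < nx := Nat.mod_lt _ hnx
  have hdiv : k % (ny * nx) / nx < ny := by
    rw [h2]; exact Nat.mod_lt _ hny
  rw [List.getElem?_map]
  simp only [h1, h2, h3]
  rw [List.getElem?_range (Nat.mod_lt _ hnx)]
  rfl

-- generic: the counter-carrying cons loop builds the reversed enumeration
theorem pvFoldStep (L : List (List Int)) (c : Int) (acc : List (Int × List Int)) :
    L.foldl (fun s v => (s.1 + 1, (s.1, v) :: s.2)) (c, acc) =
      (c + L.length, (PySem.List.enumerate L c).reverse ++ acc) := by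
  induction L generalizing c acc with
  | nil => simp [PySem.List.enumerate_nil]
  | cons v L ih =>
    rw [List.foldl_cons, ih, PySem.List.enumerate_cons]
    simp only [List.length_cons, List.reverse_cons, List.append_assoc, List.cons_append,
      List.nil_append]
    congr 1
    push_cast
    ring

-- folding over a flatMap is a nested fold
theorem pvFoldlFlatMap {α β σ : Type} (g : α → List β) (l : List α) (f : σ → β → σ) (init : σ) :
    (l.flatMap g).foldl f init = l.foldl (fun s a => (g a).foldl f s) init := by
  induction l generalizing init with
  | nil => simp
  | cons a l ih => simp [List.foldl_append, ih]

-- the enumerated coordinate list IS B's keyed closed-form list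
theorem pvEnumEq (x0 y0 z0 : Int) (NX NY NZ : Nat) :
    PySem.List.enumerate (pvCoords x0 y0 z0 NX NY NZ) 0 =
      (PySem.List.pyRange 0 ((NX : Int) * (NY : Int) * (NZ : Int)) 1).map
        (fun i => (i, [x0 + PySem.Int.mod i (NX : Int),
                       y0 + PySem.Int.mod (PySem.Int.floordiv i (NX : Int)) (NY : Int),
                       z0 + PySem.Int.floordiv i ((NX : Int) * (NY : Int))])) := by
  have hT : ((NX : Int) * (NY : Int) * (NZ : Int) - 0) = ((NX * NY * NZ : Nat) : Int) := by
    push_cast; ring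
  apply List.ext_getElem
  · rw [PySem.List.length_enumerate, pvCoords_length, List.length_map,
      PySem.List.length_pyRange_one, hT, Int.toNat_natCast]
    ring
  · intro k h1 h2
    have hk' : k < NZ * (NY * NX) := by
      rw [PySem.List.length_enumerate, pvCoords_length] at h1; exact h1
    have hc := pvCoords_get x0 y0 z0 NX NY NZ k hk'
    rw [List.getElem?_eq_getElem (by rw [pvCoords_length]; exact hk')] at hc
    have hsnd := Option.some.inj hc
    simp only [PySem.List.getElem_enumerate, List.getElem_map,
      PySem.List.getElem_pyRange_one, Prod.mk.injEq, zero_add, true_and, hsnd]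
    rw [show ((NX : Int) * (NY : Int)) = ((NX * NY : Nat) : Int) from by push_cast; ring]
    simp only [PySem.Int.mod_natCast, PySem.Int.floordiv_natCast]

-- the two per-rank association lists agree
theorem pvLoc_eq (x0 x1 y0 y1 z0 z1 : Int) :
    (pvLocA x0 x1 y0 y1 z0 z1).2.reverse = pvLocB x0 x1 y0 y1 z0 z1 := by
  have hx : max 0 (x1 - x0) = (((x1 - x0).toNat : Nat) : Int) := by
    rw [Int.ofNat_toNat, max_comm]
  have hy : max 0 (y1 - y0) = (((y1 - y0).toNat : Nat) : Int) := by
    rw [Int.ofNat_toNat, max_comm]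
  have hz : max 0 (z1 - z0) = (((z1 - z0).toNat : Nat) : Int) := by
    rw [Int.ofNat_toNat, max_comm]
  have hA : (pvLocA x0 x1 y0 y1 z0 z1).2 =
      (PySem.List.enumerate (pvCoords x0 y0 z0 (x1 - x0).toNat (y1 - y0).toNat (z1 - z0).toNat) 0).reverse := by
    have hflat : (pvCoords x0 y0 z0 (x1 - x0).toNat (y1 - y0).toNat (z1 - z0).toNat).foldl
        (fun (s : Int × List (Int × List Int)) v => (s.1 + 1, (s.1, v) :: s.2)) ((0 : Int), ([] : List (Int × List Int)))
        = (List.range (z1 - z0).toNat).foldl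
            (fun s (j : Nat) => (List.range (y1 - y0).toNat).foldl
              (fun s (t : Nat) => (List.range (x1 - x0).toNat).foldl
                (fun (s : Int × List (Int × List Int)) (k : Nat) =>
                  (s.1 + 1, (s.1, [x0 + (k : Int), y0 + (t : Int), z0 + (j : Int)]) :: s.2)) s) s)
            ((0 : Int), ([] : List (Int × List Int))) := by
      unfold pvCoords
      simp only [pvFoldlFlatMap, List.foldl_map]
    unfold pvLocA
    simp only [PySem.List.pyRange_one, List.foldl_map]
    rw [← hflat, pvFoldStep]
    simp
  rw [hA, List.reverse_reverse]
  simp only [pvLocB, hx, hy, hz]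
  exact pvEnumEq x0 y0 z0 (x1 - x0).toNat (y1 - y0).toNat (z1 - z0).toNat

-- ===== VERDICT (by name: the statement is the Claim_ definition above) =====
theorem KRCompositeIndex_spec : Claim_equal_KRCompositeIndex := by
  intro ls _
  unfold Spec_KRCompositeIndex KRCompositeIndex KRCompositeIndex_alt
  have h : (fun (idx : PySem.Dict Int (List (Int × List Int))) (p : Int × (Int × Int) × (Int × Int) × (Int × Int)) =>
      idx.insert p.1 (pvLocA p.2.1.1 p.2.1.2 p.2.2.1.1 p.2.2.1.2 p.2.2.2.1 p.2.2.2.2).2.reverse)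
      = (fun (idx : PySem.Dict Int (List (Int × List Int))) p =>
      idx.insert p.1 (pvLocB p.2.1.1 p.2.1.2 p.2.2.1.1 p.2.2.1.2 p.2.2.2.1 p.2.2.2.2)) := by
    funext idx p
    rw [pvLoc_eq]
  rw [h]
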